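-- pv_equiv track=rewrite | github.com/george-shepov/cuyahoga_cp_scraper | main.py | next_numbers
-- ===== SOURCE A (Python) =====
-- def next_numbers(start: int, direction: str, limit: int):
--     up = list(range(start, start + limit)) if direction in ("up", "both") else []
--     down = list(range(start - 1, max(0, start - limit) - 1, -1)) if direction in ("down", "both") else []
--     seq = []
--     for i in range(limit):
--         if i < len(up): seq.append(up[i])
--         if i < len(down): seq.append(down[i])
--     seen, out = set(), []
--     for n in seq:
--         if n not in seen and 0 <= n <= 999999:
--             seen.add(n); out.append(n)
--     return out
-- ===== SOURCE B (Python) =====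
-- def next_numbers(start: int, direction: str, limit: int):
--     up_on = direction in ("up", "both")
--     down_on = direction in ("down", "both")
--     lo = max(0, start - limit)
--     out = []
--     for i in range(limit):
--         if up_on and 0 <= start + i <= 999999:
--             out.append(start + i)
--         if down_on and lo <= start - 1 - i <= 999999:
--             out.append(start - 1 - i)
--     return out
-- ===== Notes on version B (the rewrite author's own statement) =====
-- stated objective: simpler
-- what changed: A builds two range lists, interleaves them index-by-index into seq, then runs a dedup-set + bounds filter pass; B is a single loop over range(limit) that emits start+i and start-1-i directly with the bounds checks inlined, dropping the seen-set entirely because up values (>= start) and down values (<= start-1) can never collide.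
import Mathlib
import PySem

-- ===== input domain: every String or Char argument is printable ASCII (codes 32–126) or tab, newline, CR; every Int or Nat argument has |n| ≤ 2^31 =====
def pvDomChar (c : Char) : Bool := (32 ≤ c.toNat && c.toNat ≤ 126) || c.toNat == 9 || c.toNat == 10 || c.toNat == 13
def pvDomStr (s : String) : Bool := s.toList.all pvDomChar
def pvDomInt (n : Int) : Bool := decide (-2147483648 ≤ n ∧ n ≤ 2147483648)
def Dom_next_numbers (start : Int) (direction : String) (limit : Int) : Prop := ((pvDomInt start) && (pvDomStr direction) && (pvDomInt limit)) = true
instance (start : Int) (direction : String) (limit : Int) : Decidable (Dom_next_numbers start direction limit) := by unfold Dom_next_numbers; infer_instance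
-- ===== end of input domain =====

-- B fuses A's three passes (build up/down lists, interleave, dedup+filter) into one loop that
-- emits each value directly; the dedup set is dropped because up and down values never collide
-- (objective: simpler, same asymptotic cost).

-- ===== PORT A =====
def next_numbers (start : Int) (direction : String) (limit : Int) : List Int :=
  let up : List Int := if direction = "up" ∨ direction = "both" then PySem.List.pyRange start (start + limit) 1 else []
  let down : List Int := if direction = "down" ∨ direction = "both" then PySem.List.pyRange (start - 1) (max 0 (start - limit) - 1) (-1) else []
  let seq : List Int := (PySem.List.pyRange 0 limit 1).foldl (fun seq i =>
    let seq := if i < (up.length : Int) then seq ++ [PySem.List.pyGetD up i 0] else seq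
    if i < (down.length : Int) then seq ++ [PySem.List.pyGetD down i 0] else seq) []
  let res := seq.foldl (fun (st : PySem.Set Int × List Int) n =>
    if ¬ st.1.contains n ∧ 0 ≤ n ∧ n ≤ 999999 then (st.1.add n, st.2 ++ [n]) else st)
    (PySem.Set.empty, [])
  res.2

-- ===== PORT B =====
def next_numbers_alt (start : Int) (direction : String) (limit : Int) : List Int :=
  let upOn := direction = "up" ∨ direction = "both"
  let downOn := direction = "down" ∨ direction = "both"
  let lo := max 0 (start - limit)
  (PySem.List.pyRange 0 limit 1).foldl (fun out i =>
    let out := if upOn ∧ 0 ≤ start + i ∧ start + i ≤ 999999 then out ++ [start + i] else out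
    if downOn ∧ lo ≤ start - 1 - i ∧ start - 1 - i ≤ 999999 then out ++ [start - 1 - i] else out) []

-- ===== PRECONDITION & SPEC =====
def Spec_next_numbers (start : Int) (direction : String) (limit : Int) (out : List Int) : Prop := out = next_numbers_alt start direction limit
instance (start : Int) (direction : String) (limit : Int) (out : List Int) : Decidable (Spec_next_numbers start direction limit out) := by unfold Spec_next_numbers; infer_instance

-- ===== CLAIM (what is proved, stated in full; the proofs are below) =====
def Claim_equal_next_numbers : Prop := ∀ (start : Int) (direction : String) (limit : Int), Dom_next_numbers start direction limit → Spec_next_numbers start direction limit (next_numbers start direction limit)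

-- ===== LEMMAS AND PROOFS =====

-- proof-only helpers: the chunk of values each loop appends at loop index k
def pvChunkA (start : Int) (u d : Prop) [Decidable u] [Decidable d] (M : Nat) (k : Nat) : List Int :=
  (if u then [start + (k : Int)] else []) ++ (if d ∧ k < M then [start - 1 - (k : Int)] else [])

def pvChunkB (start lo : Int) (u d : Prop) [Decidable u] [Decidable d] (k : Nat) : List Int :=
  (if u ∧ 0 ≤ start + (k : Int) ∧ start + (k : Int) ≤ 999999 then [start + (k : Int)] else []) ++
  (if d ∧ lo ≤ start - 1 - (k : Int) ∧ start - 1 - (k : Int) ≤ 999999 then [start - 1 - (k : Int)] else [])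

theorem pvRange_zero (limit : Int) :
    PySem.List.pyRange 0 limit = (List.range limit.toNat).map (fun k : Nat => (k : Int)) := by
  rcases le_or_gt 0 limit with h | h
  · have : limit = ((limit.toNat : Nat) : Int) := by omega
    rw [this, PySem.List.pyRange_zero_natCast]
    have h2 : ((limit.toNat : Int)).toNat = limit.toNat := by omega
    rw [h2]
  · rw [PySem.List.pyRange_of_pos 0 limit (by omega : (0:Int) < 1)]
    simp only [if_neg (by omega : ¬ (0:Int) < limit)]
    have : limit.toNat = 0 := by omega
    simp [this]

theorem pvRange_up (start limit : Int) :
    PySem.List.pyRange start (start + limit) = (List.range limit.toNat).map (fun k : Nat => start + (k : Int)) := by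
  rw [PySem.List.pyRange_of_pos start (start+limit) (by omega : (0:Int) < 1)]
  rcases le_or_gt limit 0 with h | h
  · rw [if_neg (by omega)]
    have : limit.toNat = 0 := by omega
    simp [this]
  · rw [if_pos (by omega)]
    have h1 : (start + limit - start + 1 - 1) / 1 = limit := by simp
    rw [h1]
    simp

theorem pvRange_down (start limit : Int) :
    PySem.List.pyRange (start - 1) (max 0 (start - limit) - 1) (-1) =
      (List.range (start - max 0 (start - limit)).toNat).map (fun k : Nat => start - 1 - (k : Int)) := by
  unfold PySem.List.pyRange
  rw [if_neg (by omega : ¬ (-1 : Int) = 0), if_neg (by omega : ¬ (0:Int) < -1)]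
  rcases le_or_gt start (max 0 (start - limit)) with h | h
  · rw [if_neg (by omega)]
    have : (start - max 0 (start - limit)).toNat = 0 := by omega
    simp [this]
  · rw [if_pos (by omega)]
    have h2 : (start - 1 - (max 0 (start - limit) - 1) + - -1 - 1) / - -1 = start - max 0 (start - limit) := by
      norm_num
    simp only [h2]
    apply List.map_congr_left
    intro k _
    ring

-- A's dedup/filter pass on a duplicate-free list is just a filter
theorem pvDedup_eq_filter (l : List Int) (seen : PySem.Set Int) (out : List Int)
    (hl : l.Nodup) (hs : ∀ x ∈ l, x ∉ seen) :
    (l.foldl (fun (st : PySem.Set Int × List Int) n =>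
      if ¬ st.1.contains n ∧ 0 ≤ n ∧ n ≤ 999999 then (st.1.add n, st.2 ++ [n]) else st)
      (seen, out)).2 = out ++ l.filter (fun n => decide (0 ≤ n ∧ n ≤ 999999)) := by
  induction l generalizing seen out with
  | nil => simp
  | cons h t ih =>
    have hmem : h ∉ seen := hs h (by simp)
    simp only [List.foldl_cons]
    by_cases hp : 0 ≤ h ∧ h ≤ 999999
    · rw [if_pos (by simp only [PySem.Set.contains, List.contains_iff_mem]; exact ⟨hmem, hp.1, hp.2⟩)]
      have hadd : seen.add h = seen ++ [h] := by
        simp [PySem.Set.add, hmem]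
      simp only [hadd]
      rw [ih (seen ++ [h]) (out ++ [h]) hl.of_cons ?_]
      · simp [hp]
      · intro x hx
        simp only [List.mem_append, List.mem_singleton, not_or]
        exact ⟨hs x (by simp [hx]), fun hxh => (List.nodup_cons.mp hl).1 (hxh ▸ hx)⟩
    · rw [if_neg (by intro hc; exact hp ⟨hc.2.1, hc.2.2⟩)]
      rw [ih seen out hl.of_cons (fun x hx => hs x (by simp [hx]))]
      have hpf : (decide (0 ≤ h ∧ h ≤ 999999)) = false := decide_eq_false hp
      rw [List.filter_cons, hpf]
      simp

-- A's seq never repeats a value: up values are ≥ start and pairwise distinct,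
-- down values are ≤ start - 1 and pairwise distinct
theorem pvChunkA_nodup_flatMap (start : Int) (u d : Prop) [Decidable u] [Decidable d] (M n : Nat) :
    ((List.range n).flatMap (pvChunkA start u d M)).Nodup := by
  rw [List.nodup_flatMap]
  constructor
  · intro k _
    unfold pvChunkA
    split_ifs <;> simp
    omega
  · apply List.Pairwise.imp ?_ List.pairwise_lt_range
    intro a b hab x hxa hxb
    unfold pvChunkA at hxa hxb
    simp only [List.mem_append] at hxa hxb
    rcases hxa with hxa | hxa <;> rcases hxb with hxb | hxb <;>
      split_ifs at hxa hxb <;> simp at hxa hxb <;> omega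

-- per-index: filtering A's chunk gives exactly B's chunk
theorem pvChunk_filter (start limit : Int) (u d : Prop) [Decidable u] [Decidable d] (k : Nat) :
    (pvChunkA start u d (start - max 0 (start - limit)).toNat k).filter
      (fun n => decide (0 ≤ n ∧ n ≤ 999999)) =
    pvChunkB start (max 0 (start - limit)) u d k := by
  have hM : k < (start - max 0 (start - limit)).toNat ↔ (max 0 (start - limit)) ≤ start - 1 - (k:Int) := by
    omega
  have hlo : 0 ≤ max 0 (start - limit) := by omega
  unfold pvChunkA pvChunkB
  rw [List.filter_append]
  congr 1 <;> split_ifs <;>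
    simp only [List.filter_singleton, List.filter_nil, Bool.cond_decide] <;>
    (try split_ifs) <;>
    first
      | rfl
      | (exfalso; simp_all)

theorem pvB_eq (start : Int) (direction : String) (limit : Int) :
    next_numbers_alt start direction limit =
      (List.range limit.toNat).flatMap
        (pvChunkB start (max 0 (start - limit)) (direction = "up" ∨ direction = "both")
          (direction = "down" ∨ direction = "both")) := by
  simp only [next_numbers_alt]
  rw [pvRange_zero, List.foldl_map]
  rw [PySem.List.foldl_congr_mem' _ _
    (fun acc k => acc ++ pvChunkB start (max 0 (start - limit)) (direction = "up" ∨ direction = "both")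
      (direction = "down" ∨ direction = "both") k) _ ?_]
  · rw [PySem.List.foldl_append_eq_flatMap]
    simp
  · intro k hk acc
    unfold pvChunkB
    split_ifs <;> simp_all

theorem pvA_eq (start : Int) (direction : String) (limit : Int) :
    next_numbers start direction limit =
      ((List.range limit.toNat).flatMap
        (pvChunkA start (direction = "up" ∨ direction = "both") (direction = "down" ∨ direction = "both")
          (start - max 0 (start - limit)).toNat)).filter (fun n => decide (0 ≤ n ∧ n ≤ 999999)) := by
  simp only [next_numbers]
  rw [pvRange_zero, pvRange_up, pvRange_down, List.foldl_map]
  rw [PySem.List.foldl_congr_mem' _ _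
    (fun acc k => acc ++ pvChunkA start (direction = "up" ∨ direction = "both")
      (direction = "down" ∨ direction = "both") (start - max 0 (start - limit)).toNat k) _ ?_]
  · rw [PySem.List.foldl_append_eq_flatMap]
    rw [List.nil_append]
    rw [pvDedup_eq_filter _ _ _ (pvChunkA_nodup_flatMap _ _ _ _ _) ?_]
    · simp
    · intro x _
      simp [PySem.Set.empty]
  · intro k hk acc
    have hkn : k < limit.toNat := List.mem_range.mp hk
    unfold pvChunkA
    by_cases hu : direction = "up" ∨ direction = "both" <;>
      by_cases hd : direction = "down" ∨ direction = "both" <;>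
        simp only [if_pos, hu, hd, List.length_map, List.length_range] <;>
        split_ifs <;>
        simp_all [PySem.List.pyGetD_natCast] <;>
        omega

-- ===== VERDICT (by name: the statement is the Claim_ definition above) =====
theorem next_numbers_spec : Claim_equal_next_numbers := by
  intro start direction limit _
  unfold Spec_next_numbers
  rw [pvA_eq, pvB_eq, List.filter_flatMap]
  congr 1
  funext k
  exact pvChunk_filter start limit _ _ k
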